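-- pv_equiv track=rewrite | github.com/MRostaing/Stage_graph | graph.py | genere_ensemble
-- ===== SOURCE A (Python) =====
-- def genere_ensemble(mat):
--     """
--     Entrée: matrice en notation classique
--     Sortie: matrice en notation ensemble
--     Fonction: transforme la matrice en notation ensemble"""
--     n = len(mat)
--     mat_ensemble = []
--     for i in range(n):
--         mat_ensemble.append([0])
--         for j in range(n - i - 1):
--             mat_ensemble[i] += [0]
--
--     for i in range(n - 1, -1, -1):
--         mat_ensemble[i][0] = set([mat[i][0], i])
--
--     for j in range(1, n):
--         for i in range(n - 1 - j, -1, -1):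
--             mat_ensemble[i][j] = set([i]).union(mat_ensemble[mat[i][j]][j - 1])
--     return mat_ensemble
-- ===== SOURCE B (Python) =====
-- def genere_ensemble(mat):
--     """Same transformation, but each set is defined top-down by recursion on the
--     dependency chain instead of filling a mutable table column by column."""
--     n = len(mat)
--
--     def f(i, j):
--         if j == 0:
--             return set([mat[i][0], i])
--         return set([i]) | f(mat[i][j], j - 1)
--
--     return [[f(i, j) for j in range(n - i)] for i in range(n)]
-- ===== Notes on version B (the rewrite author's own statement) =====
-- stated objective: alternative
-- what changed: replaces the bottom-up, column-by-column filling of a mutable table with a top-down recursive definition f(i,j) of each set and a comprehension building the triangular result directly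
-- outside the precondition, e.g. on genere_ensemble([[0, -1], [0]]): A returns [[{0}, {0, 1}], [{0, 1}]], B returns [[{0}, {0, -1}], [{0, 1}]]
import Mathlib
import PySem

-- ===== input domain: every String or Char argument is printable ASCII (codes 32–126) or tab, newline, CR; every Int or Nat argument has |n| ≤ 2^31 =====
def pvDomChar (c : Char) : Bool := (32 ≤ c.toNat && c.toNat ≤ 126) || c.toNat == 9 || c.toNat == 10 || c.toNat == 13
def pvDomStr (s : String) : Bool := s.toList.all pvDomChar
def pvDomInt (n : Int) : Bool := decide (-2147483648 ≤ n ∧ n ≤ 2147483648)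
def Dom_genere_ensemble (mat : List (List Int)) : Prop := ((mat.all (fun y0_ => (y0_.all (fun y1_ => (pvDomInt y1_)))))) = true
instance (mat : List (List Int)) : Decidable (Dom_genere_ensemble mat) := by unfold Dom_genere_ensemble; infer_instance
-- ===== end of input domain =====

-- B replaces A's bottom-up column-by-column table filling by a top-down recursive
-- definition of each set (alternative decomposition, not claimed faster).

-- ===== PORT A =====
-- mat[i][j] for the Nat loop indices of A (Pre_ keeps every such read in range, so the defaults are never used)
def pvCellA (mat : List (List Int)) (i j : Nat) : Int := (mat.getD i []).getD j 0
-- mat_ensemble[i][j] = v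
def pvTset (t : List (List (List Int))) (i j : Nat) (v : List Int) : List (List (List Int)) :=
  t.set i ((t.getD i []).set j v)
-- first loop: row i is [0]*(n-i); Python's int placeholder 0 is modeled as [] — every slot is overwritten before being read or returned
def pvInit (n : Nat) : List (List (List Int)) := (List.range n).map (fun i => List.replicate (n - i) ([] : List Int))
-- for i in range(n-1,-1,-1): mat_ensemble[i][0] = set([mat[i][0], i]) ; counter c+1 processes i = c
def pvPass0 (mat : List (List Int)) : Nat → List (List (List Int)) → List (List (List Int))
  | 0, t => t
  | c+1, t => pvPass0 mat c (pvTset t c 0 (PySem.Set.ofList [pvCellA mat c 0, (c : Int)]))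
-- for i in range(n-1-j,-1,-1): mat_ensemble[i][j] = set([i]).union(mat_ensemble[mat[i][j]][j-1]) ;
-- the table lookup mat_ensemble[mat[i][j]] uses Python indexing (pyGet?) on the Int value mat[i][j]
def pvColLoop (mat : List (List Int)) (j : Nat) : Nat → List (List (List Int)) → List (List (List Int))
  | 0, t => t
  | c+1, t => pvColLoop mat j c
      (pvTset t c j (PySem.Set.union (PySem.Set.ofList [(c : Int)])
        ((((PySem.List.pyGet? t (pvCellA mat c j)).getD []).getD (j-1) []))))
-- for j in range(1, n): …  (fuel f counts the remaining values of j)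
def pvJLoop (mat : List (List Int)) (n : Nat) : Nat → Nat → List (List (List Int)) → List (List (List Int))
  | 0, _, t => t
  | f+1, j, t => pvJLoop mat n f (j+1) (pvColLoop mat j (n - j) t)

def genere_ensemble (mat : List (List Int)) : List (List (List Int)) :=
  pvJLoop mat mat.length (mat.length - 1) 1 (pvPass0 mat mat.length (pvInit mat.length))

-- ===== PORT B =====
-- mat[i][j] for B, where the row index i is an Int coming from the matrix itself
def pvCellB (mat : List (List Int)) (i : Int) (j : Nat) : Int :=
  ((PySem.List.pyGet? mat i).getD []).getD j 0
-- f(i, j): set([mat[i][0], i]) if j == 0 else set([i]) | f(mat[i][j], j-1)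
def pvF (mat : List (List Int)) : Int → Nat → List Int
  | i, 0 => PySem.Set.ofList [pvCellB mat i 0, i]
  | i, j+1 => PySem.Set.union (PySem.Set.ofList [i]) (pvF mat (pvCellB mat i (j+1)) j)

def genere_ensemble_alt (mat : List (List Int)) : List (List (List Int)) :=
  (List.range mat.length).map (fun i => (List.range (mat.length - i)).map (fun j => pvF mat (i : Int) j))

-- ===== PRECONDITION & SPEC =====
-- Pre_ restricts to the function's natural domain: a triangular reachability matrix (row i has at
-- least n-i entries, and every entry mat[i][j] used as a node index satisfies 0 ≤ mat[i][j] ≤ n-j).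
-- Outside it A either raises (IndexError/TypeError) or, via negative-index wraparound, returns an
-- accidental value that B does not reproduce (see the excluded example in the claim).
def Pre_genere_ensemble (mat : List (List Int)) : Prop :=
  (∀ i < mat.length, mat.length - i ≤ (mat.getD i []).length) ∧
  (∀ i < mat.length, ∀ j < mat.length, 1 ≤ j → i + j < mat.length →
    0 ≤ (mat.getD i []).getD j 0 ∧ (mat.getD i []).getD j 0 ≤ (mat.length : Int) - (j : Int))
instance (mat : List (List Int)) : Decidable (Pre_genere_ensemble mat) := by
  unfold Pre_genere_ensemble; infer_instance
def pvWitness_genere_ensemble : List (List Int) := [[0, 1, 0], [1, 1], [2]]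
def Spec_genere_ensemble (mat : List (List Int)) (out : List (List (List Int))) : Prop := out = genere_ensemble_alt mat
instance (mat : List (List Int)) (out : List (List (List Int))) : Decidable (Spec_genere_ensemble mat out) := by unfold Spec_genere_ensemble; infer_instance

-- ===== CLAIM (what is proved, stated in full; the proofs are below) =====
def Claim_equal_genere_ensemble : Prop := ∀ (mat : List (List Int)), Dom_genere_ensemble mat → Pre_genere_ensemble mat → Spec_genere_ensemble mat (genere_ensemble mat)

-- ===== LEMMAS AND PROOFS =====

-- slot (i, j) of the table, as the ports read it
def pvSlot (t : List (List (List Int))) (i j : Nat) : List Int := (t.getD i []).getD j []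

-- table shape: n rows, row i of length n - i
def pvShp (n : Nat) (t : List (List (List Int))) : Prop :=
  t.length = n ∧ ∀ i < n, (t.getD i []).length = n - i

lemma pvGetD_set {α : Type} (l : List α) (i i' : Nat) (x d : α) :
    (l.set i x).getD i' d = if i' = i ∧ i < l.length then x else l.getD i' d := by
  simp [List.getD_eq_getElem?_getD, List.getElem?_set]
  split_ifs <;> simp_all

lemma pvCell_eq (mat : List (List Int)) (i j : Nat) : pvCellB mat (i : Int) j = pvCellA mat i j := by
  simp [pvCellA, pvCellB, PySem.List.pyGet?_natCast, List.getD_eq_getElem?_getD]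

lemma pvTset_shp {n : Nat} {t : List (List (List Int))} (h : pvShp n t) (i j : Nat) (v : List Int) :
    pvShp n (pvTset t i j v) := by
  obtain ⟨hl, hr⟩ := h
  refine ⟨by simp [pvTset, hl], fun i' hi' => ?_⟩
  rw [pvTset, pvGetD_set]
  split_ifs with hcase
  · obtain ⟨h1, h2⟩ := hcase; subst h1
    have := hr i' hi'
    simp [List.getD_eq_getElem?_getD] at this ⊢
    simpa using this
  · exact hr i' hi'

lemma pvTset_slot {n : Nat} {t : List (List (List Int))} (h : pvShp n t)
    (i j : Nat) (hi : i < n) (hj : j < n - i) (v : List Int) (i' j' : Nat) :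
    pvSlot (pvTset t i j v) i' j' = if i' = i ∧ j' = j then v else pvSlot t i' j' := by
  obtain ⟨hl, hr⟩ := h
  rw [pvSlot, pvTset, pvGetD_set]
  have hilen : i < t.length := by omega
  by_cases hii : i' = i
  · subst hii
    rw [if_pos ⟨rfl, hilen⟩, pvGetD_set]
    have hlen : j < (t.getD i' []).length := by rw [hr i' hi]; omega
    by_cases hjj : j' = j
    · rw [if_pos ⟨hjj, hlen⟩, if_pos ⟨rfl, hjj⟩]
    · rw [if_neg (by tauto), if_neg (by tauto)]; rfl
  · rw [if_neg (by tauto), if_neg (by tauto)]; rfl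

lemma pvPass0_slot {n : Nat} (mat : List (List Int)) (hn : n = mat.length)
    {t : List (List (List Int))} (h : pvShp n t) (c : Nat) (hc : c ≤ n) :
    pvShp n (pvPass0 mat c t) ∧ ∀ i' j',
      pvSlot (pvPass0 mat c t) i' j' =
        if i' < c ∧ j' = 0 then PySem.Set.ofList [pvCellA mat i' 0, (i' : Int)] else pvSlot t i' j' := by
  induction c generalizing t with
  | zero => exact ⟨h, fun i' j' => by simp [pvPass0]⟩
  | succ c ih =>
    have hcn : c < n := by omega
    have hsh := pvTset_shp h c 0 (PySem.Set.ofList [pvCellA mat c 0, (c : Int)])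
    obtain ⟨hs, hslot⟩ := ih hsh (by omega)
    refine ⟨hs, fun i' j' => ?_⟩
    have hstep : pvSlot (pvPass0 mat (c+1) t) i' j' =
        pvSlot (pvPass0 mat c (pvTset t c 0 (PySem.Set.ofList [pvCellA mat c 0, (c : Int)]))) i' j' := rfl
    rw [hstep, hslot i' j', pvTset_slot h c 0 hcn (by omega) _ i' j']
    by_cases h1 : j' = 0
    · subst h1
      by_cases h2 : i' < c
      · simp [h2, Nat.lt_succ_of_lt h2]
      · by_cases h3 : i' = c
        · subst h3; simp
        · have : ¬ i' < c + 1 := by omega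
          simp [h2, h3, this]
    · simp [h1]

-- invariant: columns below j hold the recursive values
def pvInv (mat : List (List Int)) (n j : Nat) (t : List (List (List Int))) : Prop :=
  pvShp n t ∧ ∀ i < n, ∀ j' < min j (n - i), pvSlot t i j' = pvF mat (i : Int) j'

lemma pvColLoop_slot (mat : List (List Int)) {n j : Nat}
    (hnn : n = mat.length) (hj : 1 ≤ j) (hpre : Pre_genere_ensemble mat)
    {t : List (List (List Int))} (h : pvInv mat n j t) (c : Nat) (hc : c + j ≤ n) :
    pvShp n (pvColLoop mat j c t) ∧ ∀ i' j',
      pvSlot (pvColLoop mat j c t) i' j' =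
        if i' < c ∧ j' = j then pvF mat (i' : Int) j else pvSlot t i' j' := by
  induction c generalizing t with
  | zero => exact ⟨h.1, fun i' j' => by simp [pvColLoop]⟩
  | succ c ih =>
    obtain ⟨hsh, hinv⟩ := h
    have hcn : c < n := by omega
    have hjn : j < n := by omega
    -- the entry k = mat[c][j] is a valid row index: 0 ≤ k ≤ n - j
    set k : Int := pvCellA mat c j with hkdef
    have hk : 0 ≤ k ∧ k ≤ (n : Int) - (j : Int) := by
      have := hpre.2 c (by omega) j (by omega) hj (by omega)
      simpa [hkdef, pvCellA, ← hnn] using this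
    obtain ⟨hk0, hk1⟩ := hk
    have hm : k = ((k.toNat : Nat) : Int) := by omega
    set m : Nat := k.toNat with hmdef
    have hmn : m + j ≤ n := by omega
    have hmlt : m < n := by omega
    have htl : t.length = n := hsh.1
    -- the looked-up slot is column j-1 of row m, already holding pvF m (j-1)
    have hlook : (((PySem.List.pyGet? t k).getD []).getD (j-1) []) = pvF mat (m : Int) (j-1) := by
      rw [hm, PySem.List.pyGet?_natCast, List.getElem?_eq_getElem (show m < t.length by omega)]
      have hrow : t[m] = t.getD m [] := by
        rw [List.getD_eq_getElem?_getD, List.getElem?_eq_getElem (show m < t.length by omega)]; rfl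
      rw [Option.getD_some, hrow]
      exact hinv m hmlt (j-1) (by omega)
    have hval : PySem.Set.union (PySem.Set.ofList [(c : Int)])
        (((PySem.List.pyGet? t k).getD []).getD (j-1) []) = pvF mat (c : Int) j := by
      rw [hlook]
      have hj1 : j = (j-1) + 1 := by omega
      conv_rhs => rw [hj1]
      show _ = PySem.Set.union (PySem.Set.ofList [(c : Int)])
          (pvF mat (pvCellB mat (c : Int) ((j-1)+1)) (j-1))
      have hcell : pvCellB mat (c : Int) ((j-1)+1) = (m : Int) := by
        rw [← hj1, pvCell_eq, ← hkdef, hm]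
      rw [hcell]
    -- one write, then the induction hypothesis on the updated table
    have hinv' : pvInv mat n j (pvTset t c j (PySem.Set.union (PySem.Set.ofList [(c : Int)])
        (((PySem.List.pyGet? t k).getD []).getD (j-1) []))) := by
      refine ⟨pvTset_shp hsh c j _, fun i hi j' hj' => ?_⟩
      rw [pvTset_slot hsh c j hcn (by omega) _ i j']
      have hne : ¬ (i = c ∧ j' = j) := by omega
      rw [if_neg hne]
      exact hinv i hi j' hj'
    obtain ⟨hs2, hslot2⟩ := ih hinv' (by omega)
    refine ⟨hs2, fun i' j' => ?_⟩
    have hstep : pvSlot (pvColLoop mat j (c+1) t) i' j' =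
        pvSlot (pvColLoop mat j c (pvTset t c j (PySem.Set.union (PySem.Set.ofList [(c : Int)])
          (((PySem.List.pyGet? t k).getD []).getD (j-1) [])))) i' j' := rfl
    rw [hstep, hslot2 i' j', pvTset_slot hsh c j hcn (by omega) _ i' j', hval]
    by_cases h1 : j' = j
    · subst h1
      by_cases h2 : i' < c
      · simp [h2, Nat.lt_succ_of_lt h2]
      · by_cases h3 : i' = c
        · subst h3; simp
        · have : ¬ i' < c + 1 := by omega
          simp [h2, h3, this]
    · simp [h1]

lemma pvJLoop_inv (mat : List (List Int)) {n : Nat} (hnn : n = mat.length)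
    (hpre : Pre_genere_ensemble mat) (f : Nat) :
    ∀ (j : Nat) (t : List (List (List Int))), 1 ≤ j → f + j = n → pvInv mat n j t →
      pvShp n (pvJLoop mat n f j t) ∧
      ∀ i < n, ∀ j' < n - i, pvSlot (pvJLoop mat n f j t) i j' = pvF mat (i : Int) j' := by
  induction f with
  | zero =>
    intro j t hj hfj hinv
    have hjn : j = n := by omega
    subst hjn
    exact ⟨hinv.1, fun i hi j' hj' => hinv.2 i hi j' (by omega)⟩
  | succ f ih =>
    intro j t hj hfj hinv
    obtain ⟨hs3, hslot3⟩ := pvColLoop_slot mat hnn hj hpre hinv (n - j) (by omega)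
    have hinv2 : pvInv mat n (j+1) (pvColLoop mat j (n-j) t) := by
      refine ⟨hs3, fun i hi j' hj' => ?_⟩
      rw [hslot3 i j']
      by_cases h1 : j' = j
      · subst h1
        have hlt : i < n - j' := by omega
        simp [hlt]
      · rw [if_neg (by tauto)]
        exact hinv.2 i hi j' (by omega)
    exact ih (j+1) _ (by omega) (by omega) hinv2

-- ===== VERDICT (by name: the statement is the Claim_ definition above) =====
theorem genere_ensemble_spec : Claim_equal_genere_ensemble := by
  intro mat _ hpre
  show genere_ensemble mat = genere_ensemble_alt mat
  by_cases hz : mat.length = 0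
  · have hmat : mat = [] := List.eq_nil_of_length_eq_zero hz
    subst hmat; rfl
  · set n := mat.length with hnn
    have hn1 : 1 ≤ n := by omega
    have hinit : pvShp n (pvInit n) := by
      refine ⟨by simp [pvInit], fun i hi => ?_⟩
      simp [pvInit, List.getD_eq_getElem?_getD, hi]
    obtain ⟨hs1, hslot1⟩ := pvPass0_slot mat hnn hinit n le_rfl
    have hinv1 : pvInv mat n 1 (pvPass0 mat n (pvInit n)) := by
      refine ⟨hs1, fun i hi j' hj' => ?_⟩
      have hj0 : j' = 0 := by omega
      subst hj0
      rw [hslot1 i 0, if_pos ⟨hi, rfl⟩]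
      simp [pvF, pvCell_eq]
    obtain ⟨hsf, hslotf⟩ := pvJLoop_inv mat hnn hpre (n-1) 1 _ le_rfl (by omega) hinv1
    have hge : genere_ensemble mat = pvJLoop mat n (n-1) 1 (pvPass0 mat n (pvInit n)) := rfl
    rw [hge, genere_ensemble_alt]
    have hlen : (pvJLoop mat n (n-1) 1 (pvPass0 mat n (pvInit n))).length = n := hsf.1
    apply List.ext_getElem
    · simp [hlen, ← hnn]
    · intro i h1 h2
      have hi : i < n := by omega
      have hrow : (pvJLoop mat n (n-1) 1 (pvPass0 mat n (pvInit n)))[i] =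
          (pvJLoop mat n (n-1) 1 (pvPass0 mat n (pvInit n))).getD i [] :=
        (List.getD_eq_getElem _ _ h1).symm
      rw [List.getElem_map, List.getElem_range, hrow]
      have hrlen : ((pvJLoop mat n (n-1) 1 (pvPass0 mat n (pvInit n))).getD i []).length = n - i :=
        hsf.2 i hi
      apply List.ext_getElem
      · rw [hrlen]; simp [hnn]
      · intro j hj1 hj2
        have hjn : j < n - i := by omega
        have hcell : ((pvJLoop mat n (n-1) 1 (pvPass0 mat n (pvInit n))).getD i [])[j] =
            ((pvJLoop mat n (n-1) 1 (pvPass0 mat n (pvInit n))).getD i []).getD j [] :=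
          (List.getD_eq_getElem _ _ hj1).symm
        rw [hcell, List.getElem_map, List.getElem_range]
        exact hslotf i hi j hjn
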